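-- pv_equiv track=rewrite | github.com/neharmenon05/Genome_Assembly | app.py | scaffold_with_long_reads
-- ===== SOURCE A (Python) =====
-- def scaffold_with_long_reads(assembled_sequence, long_reads):
--     scaffolds = assembled_sequence.copy()
--     for long_read in long_reads:
--         i = 0
--         while i < len(scaffolds) - 1:
--             if scaffolds[i] in long_read and scaffolds[i + 1] in long_read:
--                 scaffolds[i] += "N" * 10 + scaffolds[i + 1]
--                 scaffolds.pop(i + 1)
--             else:
--                 i += 1
--     return scaffolds
-- ===== SOURCE B (Python) =====
-- def scaffold_with_long_reads(assembled_sequence, long_reads):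
--     scaffolds = assembled_sequence.copy()
--     for long_read in long_reads:
--         new = []
--         for s in scaffolds:
--             if new and new[-1] in long_read and s in long_read:
--                 new[-1] += "N" * 10 + s
--             else:
--                 new.append(s)
--         scaffolds = new
--     return scaffolds
-- ===== Notes on version B (the rewrite author's own statement) =====
-- stated objective: simpler
-- what changed: Replaces A's in-place while-loop with index rewinding and pop(i+1) by a single forward fold per long read that builds a fresh output list, merging each fragment into the accumulator's last element when both occur in the read.
import Mathlib
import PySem

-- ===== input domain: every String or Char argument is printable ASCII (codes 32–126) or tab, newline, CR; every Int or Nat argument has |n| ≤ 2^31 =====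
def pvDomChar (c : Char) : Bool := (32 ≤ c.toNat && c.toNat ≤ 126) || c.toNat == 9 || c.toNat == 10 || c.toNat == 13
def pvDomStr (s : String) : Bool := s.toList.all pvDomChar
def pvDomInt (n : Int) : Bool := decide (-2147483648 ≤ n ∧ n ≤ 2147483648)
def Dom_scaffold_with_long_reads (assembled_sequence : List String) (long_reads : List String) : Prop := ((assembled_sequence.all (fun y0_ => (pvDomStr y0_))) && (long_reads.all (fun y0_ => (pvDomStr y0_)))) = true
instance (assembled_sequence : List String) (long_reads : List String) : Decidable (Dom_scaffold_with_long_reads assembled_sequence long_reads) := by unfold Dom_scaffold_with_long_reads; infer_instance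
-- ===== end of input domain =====

-- B replaces A's in-place while loop (index rewind + pop) by one forward fold per read
-- building a fresh list, merging into the accumulator's last element: simpler, same values.

-- ===== PORT A =====
-- the inner 'while i < len(scaffolds) - 1' loop of A for one long_read
def pvA_loop (lr : String) (scaffolds : List String) (i : Nat) : List String :=
  if h : i + 1 < scaffolds.length then
    let a := scaffolds.getD i ""
    let b := scaffolds.getD (i + 1) ""
    if PySem.Str.isIn a lr && PySem.Str.isIn b lr then
      pvA_loop lr (scaffolds.take i ++ (a ++ "NNNNNNNNNN" ++ b) :: scaffolds.drop (i + 2)) i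
    else
      pvA_loop lr scaffolds (i + 1)
  else scaffolds
termination_by scaffolds.length - i
decreasing_by
  · simp [List.length_append, List.length_take]; omega
  · omega

def scaffold_with_long_reads (assembled_sequence : List String) (long_reads : List String) : List String :=
  long_reads.foldl (fun scaffolds lr => pvA_loop lr scaffolds 0) assembled_sequence

-- ===== PORT B =====
-- one step of Source B's inner 'for s in scaffolds' loop over the output list 'new'
def pvB_merge (lr : String) (new : List String) (s : String) : List String :=
  match new.getLast? with
  | some last =>
      if PySem.Str.isIn last lr && PySem.Str.isIn s lr then
        new.dropLast ++ [last ++ "NNNNNNNNNN" ++ s]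
      else new ++ [s]
  | none => new ++ [s]

def scaffold_with_long_reads_alt (assembled_sequence : List String) (long_reads : List String) : List String :=
  long_reads.foldl (fun scaffolds lr => scaffolds.foldl (pvB_merge lr) []) assembled_sequence

-- ===== PRECONDITION & SPEC =====
def Spec_scaffold_with_long_reads (assembled_sequence : List String) (long_reads : List String) (out : List String) : Prop := out = scaffold_with_long_reads_alt assembled_sequence long_reads
instance (assembled_sequence : List String) (long_reads : List String) (out : List String) : Decidable (Spec_scaffold_with_long_reads assembled_sequence long_reads out) := by unfold Spec_scaffold_with_long_reads; infer_instance

-- ===== CLAIM (what is proved, stated in full; the proofs are below) =====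
def Claim_equal_scaffold_with_long_reads : Prop := ∀ (assembled_sequence : List String) (long_reads : List String), Dom_scaffold_with_long_reads assembled_sequence long_reads → Spec_scaffold_with_long_reads assembled_sequence long_reads (scaffold_with_long_reads assembled_sequence long_reads)

-- ===== LEMMAS AND PROOFS =====

-- A's loop state 'scaffolds, i' is 'front ++ last :: rest' with i = front.length:
-- front is finished output, 'last' is the running accumulator, rest the unprocessed tail.
theorem pvA_loop_eq_foldl (lr : String) :
    ∀ (rest front : List String) (last : String),
      pvA_loop lr (front ++ last :: rest) front.length =
        rest.foldl (pvB_merge lr) (front ++ [last]) := by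
  intro rest
  induction rest with
  | nil =>
      intro front last
      rw [pvA_loop]
      simp
  | cons s rest' ih =>
      intro front last
      rw [pvA_loop]
      have hlen : front.length + 1 < (front ++ last :: s :: rest').length := by
        simp
      rw [dif_pos hlen]
      have ha : (front ++ last :: s :: rest').getD front.length "" = last := by
        simp [List.getD]
      have hb : (front ++ last :: s :: rest').getD (front.length + 1) "" = s := by
        have : front.length + 1 - front.length = 1 := by omega
        simp [List.getD, this]
      rw [ha, hb]
      have hl : (front ++ [last]).getLast? = some last := by simp
      by_cases hc : (PySem.Str.isIn last lr && PySem.Str.isIn s lr) = true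
      · rw [if_pos hc]
        have htake : (front ++ last :: s :: rest').take front.length = front := by
          simp
        have hdrop : (front ++ last :: s :: rest').drop (front.length + 2) = rest' := by
          simp [List.drop_append]
        rw [htake, hdrop]
        have := ih front (last ++ "NNNNNNNNNN" ++ s)
        rw [this]
        simp only [List.foldl_cons, pvB_merge, hl, hc, if_true, List.dropLast_concat]
      · rw [if_neg hc]
        rw [Bool.not_eq_true] at hc
        have := ih (front ++ [last]) s
        simp only [List.append_assoc, List.cons_append, List.nil_append,
          List.length_append, List.length_cons, List.length_nil] at this ⊢
        rw [this]
        simp only [List.foldl_cons, pvB_merge, hl, hc, Bool.false_eq_true, if_false,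
          List.append_assoc, List.cons_append, List.nil_append]

theorem pvA_loop_zero (lr : String) (sc : List String) :
    pvA_loop lr sc 0 = sc.foldl (pvB_merge lr) [] := by
  cases sc with
  | nil => rw [pvA_loop]; simp
  | cons x rest =>
      have := pvA_loop_eq_foldl lr rest [] x
      simpa [pvB_merge] using this

theorem ports_agree (assembled_sequence long_reads : List String) :
    scaffold_with_long_reads assembled_sequence long_reads =
      scaffold_with_long_reads_alt assembled_sequence long_reads := by
  unfold scaffold_with_long_reads scaffold_with_long_reads_alt
  simp only [pvA_loop_zero]

-- ===== VERDICT (by name: the statement is the Claim_ definition above) =====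
theorem scaffold_with_long_reads_spec : Claim_equal_scaffold_with_long_reads := by
  intro assembled_sequence long_reads _
  exact ports_agree assembled_sequence long_reads
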